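-- pv_equiv track=rewrite | github.com/skreynolds/uta_cse_1309x | assignment_3/find_word_horizontal.py | find_word_horizontal
-- ===== SOURCE A (Python) =====
-- def find_word_horizontal(crossword, word):
--     row = 0
--     for L in crossword:
--         chr_string = ''.join(L)
--         if word in chr_string:
--             col = chr_string.find(word)
--             return [row, col]
--         row += 1
--     return None
-- ===== SOURCE B (Python) =====
-- def find_word_horizontal(crossword, word):
--     w = list(word)
--     n = len(w)
--     row = 0
--     for L in crossword:
--         cells = [c for cell in L for c in cell]
--         start = 0
--         while start + n <= len(cells):
--             if all(cells[start + k] == w[k] for k in range(n)):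
--                 return [row, start]
--             start += 1
--         row += 1
--     return None
-- ===== Notes on version B (the rewrite author's own statement) =====
-- stated objective: alternative
-- what changed: B drops ''.join / `in` / str.find entirely: it flattens each row's cells into a char list and slides a window over candidate start positions, comparing the word character by character and returning on the first full match.
import Mathlib
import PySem

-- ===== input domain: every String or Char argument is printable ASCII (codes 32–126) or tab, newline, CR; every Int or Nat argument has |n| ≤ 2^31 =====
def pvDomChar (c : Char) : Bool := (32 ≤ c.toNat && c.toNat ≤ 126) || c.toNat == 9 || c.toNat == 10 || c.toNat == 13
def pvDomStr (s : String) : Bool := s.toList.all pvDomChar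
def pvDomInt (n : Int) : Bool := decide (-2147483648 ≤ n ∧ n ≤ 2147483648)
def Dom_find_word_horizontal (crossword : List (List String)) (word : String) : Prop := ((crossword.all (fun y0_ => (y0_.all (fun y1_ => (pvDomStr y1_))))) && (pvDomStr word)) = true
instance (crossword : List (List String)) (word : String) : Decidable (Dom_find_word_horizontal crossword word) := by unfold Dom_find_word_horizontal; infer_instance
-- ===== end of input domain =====

-- B replaces ''.join + `in` + str.find with an explicit sliding-window char-by-char scan
-- over the row's cells (objective: alternative decomposition, same asymptotic cost).

-- ===== PORT A =====
-- the 'for L in crossword' loop with the running 'row' counter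
def pvGoA (word : String) : List (List String) → Int → Option (List Int)
  | [], _ => none
  | L :: rest, row =>
    let chr_string := PySem.Str.join "" L
    if PySem.Str.isIn word chr_string then
      some [row, PySem.Str.find chr_string word]
    else pvGoA word rest (row + 1)

def find_word_horizontal (crossword : List (List String)) (word : String) : Option (List Int) :=
  pvGoA word crossword 0

-- ===== PORT B =====
-- 'all(cells[start + k] == w[k] for k in range(n))': compare word chars against the cells from 'start'
def pvChk : List Char → List Char → Bool
  | [], _ => true
  | _ :: _, [] => false
  | c :: w, d :: s => c == d && pvChk w s

-- the 'while start + n <= len(cells)' loop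
def pvScan (w s : List Char) (start : Nat) : Option Nat :=
  if _h : start + w.length ≤ s.length then
    if pvChk w (s.drop start) then some start else pvScan w s (start + 1)
  else none
termination_by s.length + 1 - start
decreasing_by omega

-- the outer 'for L in crossword' loop with the running 'row' counter
def pvGoB (w : List Char) : List (List String) → Nat → Option (List Int)
  | [], _ => none
  | L :: rest, row =>
    match pvScan w ((L.map String.toList).flatten) 0 with
    | some st => some [(row : Int), (st : Int)]
    | none => pvGoB w rest (row + 1)

def find_word_horizontal_alt (crossword : List (List String)) (word : String) : Option (List Int) :=
  pvGoB word.toList crossword 0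

-- ===== PRECONDITION & SPEC =====
def Spec_find_word_horizontal (crossword : List (List String)) (word : String) (out : Option (List Int)) : Prop := out = find_word_horizontal_alt crossword word
instance (crossword : List (List String)) (word : String) (out : Option (List Int)) : Decidable (Spec_find_word_horizontal crossword word out) := by unfold Spec_find_word_horizontal; infer_instance

-- ===== CLAIM (what is proved, stated in full; the proofs are below) =====
def Claim_equal_find_word_horizontal : Prop := ∀ (crossword : List (List String)) (word : String), Dom_find_word_horizontal crossword word → Spec_find_word_horizontal crossword word (find_word_horizontal crossword word)

-- ===== LEMMAS AND PROOFS =====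

theorem pvChk_iff (w : List Char) : ∀ s : List Char, pvChk w s = true ↔ w <+: s := by
  induction w with
  | nil => intro s; simp [pvChk]
  | cons c w ih =>
    intro s
    cases s with
    | nil => simp only [pvChk]; simp
    | cons d t =>
      simp only [pvChk, Bool.and_eq_true, beq_iff_eq, List.cons_prefix_cons, ih t]

theorem intercalate_nil_eq_flatten (l : List (List Char)) : [].intercalate l = l.flatten := by
  induction l with
  | nil => rfl
  | cons h t ih =>
    cases t with
    | nil => simp [List.intercalate]
    | cons b tb =>
      simp only [List.intercalate, List.intersperse] at ih ⊢
      simp_all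

theorem pvScan_spec (w s : List Char) (start : Nat)
    (hinv : ∀ i, i < start → ¬ w <+: s.drop i) :
    pvScan w s start =
      if PySem.Chars.isIn w s = true then some (PySem.Chars.find s w).toNat else none := by
  revert hinv
  fun_induction pvScan w s start with
  | case1 start h hchk =>
    intro hinv
    have hp : w <+: s.drop start := (pvChk_iff w _).1 hchk
    have hin : PySem.Chars.isIn w s = true :=
      (PySem.Chars.exists_prefix_drop_iff_isIn _ _).1 ⟨start, hp⟩
    have hnn : 0 ≤ PySem.Chars.find s w :=
      (PySem.Chars.find_nonneg_iff _ _).2 ((PySem.Chars.isIn_iff_infix _ _).1 hin)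
    obtain ⟨hfp, hmin⟩ := PySem.Chars.find_spec (s := s) (sub := w) hnn
    have heq : (PySem.Chars.find s w).toNat = start := by
      rcases Nat.lt_trichotomy (PySem.Chars.find s w).toNat start with hlt | he | hgt
      · exact absurd hfp (hinv _ hlt)
      · exact he
      · exact absurd hp (hmin _ hgt)
    simp [hin, heq]
  | case2 start h hchk ih =>
    intro hinv
    apply ih
    intro i hi
    rcases Nat.lt_or_ge i start with hlt | hge
    · exact hinv i hlt
    · have : i = start := by omega
      subst this
      exact fun hp => absurd ((pvChk_iff w _).2 hp) (by simp [hchk])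
  | case3 start h =>
    intro hinv
    have hno : PySem.Chars.isIn w s ≠ true := by
      intro hin
      obtain ⟨j, hp⟩ := (PySem.Chars.exists_prefix_drop_iff_isIn _ _).2 hin
      rcases Nat.lt_or_ge j start with hlt | hge
      · exact hinv j hlt hp
      · have hlen : w.length ≤ s.length - j := by
          simpa using hp.length_le
        by_cases hw : w.length = 0
        · -- w = [], so the very first test (start = 0) would have succeeded
          have hs0 : 0 < start := by omega
          exact hinv 0 hs0 (by simp [List.eq_nil_of_length_eq_zero hw])
        · omega
    simp [hno]

theorem pvGo_eq (word : String) (cw : List (List String)) (row : Nat) :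
    pvGoA word cw (row : Int) = pvGoB word.toList cw row := by
  induction cw generalizing row with
  | nil => rfl
  | cons L rest ih =>
    have hs : (PySem.Str.join "" L).toList = (L.map String.toList).flatten := by
      simp [PySem.Str.toList_join, PySem.Chars.join, intercalate_nil_eq_flatten]
    have hscan := pvScan_spec word.toList ((L.map String.toList).flatten) 0 (by omega)
    rw [pvGoA, pvGoB, hscan]
    by_cases hin : PySem.Chars.isIn word.toList ((L.map String.toList).flatten) = true
    · have hnn : 0 ≤ PySem.Chars.find ((L.map String.toList).flatten) word.toList :=
        (PySem.Chars.find_nonneg_iff _ _).2 ((PySem.Chars.isIn_iff_infix _ _).1 hin)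
      simp only [hin, if_pos]
      rw [if_pos (by simp [PySem.Str.isIn_eq, hs, hin])]
      simp [PySem.Str.find_eq, hs, Int.toNat_of_nonneg hnn]
    · simp only [hin, if_neg, Bool.not_eq_true]
      rw [if_neg (by simp [PySem.Str.isIn_eq, hs, hin])]
      have : ((row : Int) + 1) = ((row + 1 : Nat) : Int) := by push_cast; ring
      rw [this]
      exact ih (row + 1)

-- ===== VERDICT (by name: the statement is the Claim_ definition above) =====
theorem find_word_horizontal_spec : Claim_equal_find_word_horizontal := by
  intro cw word _
  unfold Spec_find_word_horizontal find_word_horizontal find_word_horizontal_alt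
  simpa using pvGo_eq word cw 0
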